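-- pv_equiv track=rewrite | github.com/Bonaparte003/SparseMatrix | classes.py | csr_addition
-- ===== SOURCE A (Python) =====
-- def csr_addition(row_index1, column_index1, value1, row_index2, column_index2, value2):
--     result_row_index = []
--     result_column_index = []
--     result_value = []
--
--     i, j = 0, 0
--     while i < len(row_index1) and j < len(row_index2):
--         if row_index1[i] == row_index2[j] and column_index1[i] == column_index2[j]:
--             result_row_index.append(row_index1[i])
--             result_column_index.append(column_index1[i])
--             result_value.append(value1[i] + value2[j])
--             i += 1
--             j += 1
--         elif (row_index1[i] < row_index2[j]) or (row_index1[i] == row_index2[j] and column_index1[i] < column_index2[j]):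
--             result_row_index.append(row_index1[i])
--             result_column_index.append(column_index1[i])
--             result_value.append(value1[i])
--             i += 1
--         else:
--             result_row_index.append(row_index2[j])
--             result_column_index.append(column_index2[j])
--             result_value.append(value2[j])
--             j += 1
--
--     while i < len(row_index1):
--         result_row_index.append(row_index1[i])
--         result_column_index.append(column_index1[i])
--         result_value.append(value1[i])
--         i += 1
--
--     while j < len(row_index2):
--         result_row_index.append(row_index2[j])
--         result_column_index.append(column_index2[j])
--         result_value.append(value2[j])
--         j += 1
--
--     return result_row_index, result_column_index, result_value
-- ===== SOURCE B (Python) =====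
-- def csr_addition(row_index1, column_index1, value1, row_index2, column_index2, value2):
--     # Zip each matrix into one list of (row, col, value) triples, merge the two
--     # stacks of triples with lexicographic tuple comparison, then unzip.
--     a = list(zip(row_index1, column_index1, value1))[::-1]
--     b = list(zip(row_index2, column_index2, value2))[::-1]
--     out = []
--     while a and b:
--         (r1, c1, v1), (r2, c2, v2) = a[-1], b[-1]
--         if (r1, c1) == (r2, c2):
--             a.pop()
--             b.pop()
--             out.append((r1, c1, v1 + v2))
--         elif (r1, c1) < (r2, c2):
--             out.append(a.pop())
--         else:
--             out.append(b.pop())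
--     out.extend(reversed(a))
--     out.extend(reversed(b))
--     return [t[0] for t in out], [t[1] for t in out], [t[2] for t in out]
-- ===== Notes on version B (the rewrite author's own statement) =====
-- stated objective: simpler
-- what changed: B zips each matrix's three parallel lists into a single list of (row, col, value) triples, merges the two triple stacks with lexicographic tuple comparison and structural consumption (pop), and unzips at the end, replacing A's index arithmetic i/j over six parallel lists and its two separate tail loops.
import Mathlib
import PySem

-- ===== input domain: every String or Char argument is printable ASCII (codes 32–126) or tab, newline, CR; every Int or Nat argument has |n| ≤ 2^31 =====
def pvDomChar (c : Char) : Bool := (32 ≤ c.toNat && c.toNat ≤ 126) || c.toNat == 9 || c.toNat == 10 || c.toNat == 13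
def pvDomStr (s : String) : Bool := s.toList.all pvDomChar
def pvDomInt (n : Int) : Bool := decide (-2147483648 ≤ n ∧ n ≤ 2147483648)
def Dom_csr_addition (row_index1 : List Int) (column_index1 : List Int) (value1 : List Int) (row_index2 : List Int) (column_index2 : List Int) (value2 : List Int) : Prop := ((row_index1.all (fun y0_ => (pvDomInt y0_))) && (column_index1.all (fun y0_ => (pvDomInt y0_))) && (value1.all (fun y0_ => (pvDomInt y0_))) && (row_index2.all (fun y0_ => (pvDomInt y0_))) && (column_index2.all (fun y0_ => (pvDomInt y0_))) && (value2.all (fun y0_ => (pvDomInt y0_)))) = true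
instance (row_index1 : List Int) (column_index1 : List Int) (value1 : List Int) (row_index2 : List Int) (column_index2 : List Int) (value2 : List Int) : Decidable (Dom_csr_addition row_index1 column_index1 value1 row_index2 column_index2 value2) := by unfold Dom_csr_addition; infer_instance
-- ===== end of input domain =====

-- B merges the two matrices as single lists of (row,col,value) triples instead of six
-- index-addressed parallel lists: a simpler decomposition, same linear cost.

-- ===== PORT A =====
-- tail while-loops of A ("while i < len(row_index1): append row/col/val; i += 1")
def csrTail (r c v : List Int) (i : Nat) : List Int × List Int × List Int :=
  if i < r.length then
    let rest := csrTail r c v (i + 1)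
    (r.getD i 0 :: rest.1, c.getD i 0 :: rest.2.1, v.getD i 0 :: rest.2.2)
  else ([], [], [])
termination_by r.length - i

-- main while-loop of A; appending to the three result lists becomes consing in
-- forward recursion (same elements, same order); in-range list indexing xs[i] is getD
def csrMain (r1 c1 v1 r2 c2 v2 : List Int) (i j : Nat) : List Int × List Int × List Int :=
  if i < r1.length ∧ j < r2.length then
    if r1.getD i 0 = r2.getD j 0 ∧ c1.getD i 0 = c2.getD j 0 then
      let rest := csrMain r1 c1 v1 r2 c2 v2 (i + 1) (j + 1)
      (r1.getD i 0 :: rest.1, c1.getD i 0 :: rest.2.1, (v1.getD i 0 + v2.getD j 0) :: rest.2.2)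
    else if r1.getD i 0 < r2.getD j 0 ∨ (r1.getD i 0 = r2.getD j 0 ∧ c1.getD i 0 < c2.getD j 0) then
      let rest := csrMain r1 c1 v1 r2 c2 v2 (i + 1) j
      (r1.getD i 0 :: rest.1, c1.getD i 0 :: rest.2.1, v1.getD i 0 :: rest.2.2)
    else
      let rest := csrMain r1 c1 v1 r2 c2 v2 i (j + 1)
      (r2.getD j 0 :: rest.1, c2.getD j 0 :: rest.2.1, v2.getD j 0 :: rest.2.2)
  else
    let t1 := csrTail r1 c1 v1 i
    let t2 := csrTail r2 c2 v2 j
    (t1.1 ++ t2.1, t1.2.1 ++ t2.2.1, t1.2.2 ++ t2.2.2)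
termination_by (r1.length - i) + (r2.length - j)
decreasing_by all_goals omega

def csr_addition (row_index1 : List Int) (column_index1 : List Int) (value1 : List Int) (row_index2 : List Int) (column_index2 : List Int) (value2 : List Int) : List Int × List Int × List Int :=
  csrMain row_index1 column_index1 value1 row_index2 column_index2 value2 0 0

-- ===== PORT B =====
-- Python's zip over three lists (truncates to the shortest)
def zip3L : List Int → List Int → List Int → List (Int × Int × Int)
  | x :: xs, y :: ys, z :: zs => (x, y, z) :: zip3L xs ys zs
  | _, _, _ => []

-- Source B keeps the two pending stacks reversed and pops from the END; the port keeps
-- them unreversed and consumes the HEAD — the same elements in the same order.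
-- (r1,c1) < (r2,c2) tuple comparison is spelled out lexicographically.
def mergeB : List (Int × Int × Int) → List (Int × Int × Int) → List (Int × Int × Int)
  | [], b => b
  | a, [] => a
  | (r1, c1, v1) :: a, (r2, c2, v2) :: b =>
    if r1 = r2 ∧ c1 = c2 then (r1, c1, v1 + v2) :: mergeB a b
    else if r1 < r2 ∨ (r1 = r2 ∧ c1 < c2) then (r1, c1, v1) :: mergeB a ((r2, c2, v2) :: b)
    else (r2, c2, v2) :: mergeB ((r1, c1, v1) :: a) b

def csr_addition_alt (row_index1 : List Int) (column_index1 : List Int) (value1 : List Int) (row_index2 : List Int) (column_index2 : List Int) (value2 : List Int) : List Int × List Int × List Int :=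
  let out := mergeB (zip3L row_index1 column_index1 value1) (zip3L row_index2 column_index2 value2)
  (out.map (·.1), out.map (·.2.1), out.map (·.2.2))

-- ===== PRECONDITION & SPEC =====
-- Exactly the inputs on which A returns: A reads column_index/value at every index
-- 0..len(row_index)-1 of each side, so it raises IndexError iff a column/value list is
-- shorter than its row list.
def Pre_csr_addition (row_index1 : List Int) (column_index1 : List Int) (value1 : List Int) (row_index2 : List Int) (column_index2 : List Int) (value2 : List Int) : Prop :=
  row_index1.length ≤ column_index1.length ∧ row_index1.length ≤ value1.length ∧
  row_index2.length ≤ column_index2.length ∧ row_index2.length ≤ value2.length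
instance (row_index1 : List Int) (column_index1 : List Int) (value1 : List Int) (row_index2 : List Int) (column_index2 : List Int) (value2 : List Int) : Decidable (Pre_csr_addition row_index1 column_index1 value1 row_index2 column_index2 value2) := by unfold Pre_csr_addition; infer_instance
def pvWitness_csr_addition : List Int × List Int × List Int × List Int × List Int × List Int :=
  ([0, 1], [1, 0], [5, 7], [0], [1], [2])

def Spec_csr_addition (row_index1 : List Int) (column_index1 : List Int) (value1 : List Int) (row_index2 : List Int) (column_index2 : List Int) (value2 : List Int) (out : List Int × List Int × List Int) : Prop := out = csr_addition_alt row_index1 column_index1 value1 row_index2 column_index2 value2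
instance (row_index1 : List Int) (column_index1 : List Int) (value1 : List Int) (row_index2 : List Int) (column_index2 : List Int) (value2 : List Int) (out : List Int × List Int × List Int) : Decidable (Spec_csr_addition row_index1 column_index1 value1 row_index2 column_index2 value2 out) := by unfold Spec_csr_addition; infer_instance

-- ===== CLAIM (what is proved, stated in full; the proofs are below) =====
def Claim_equal_csr_addition : Prop := ∀ (row_index1 : List Int) (column_index1 : List Int) (value1 : List Int) (row_index2 : List Int) (column_index2 : List Int) (value2 : List Int), Dom_csr_addition row_index1 column_index1 value1 row_index2 column_index2 value2 → Pre_csr_addition row_index1 column_index1 value1 row_index2 column_index2 value2 → Spec_csr_addition row_index1 column_index1 value1 row_index2 column_index2 value2 (csr_addition row_index1 column_index1 value1 row_index2 column_index2 value2)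

-- ===== LEMMAS AND PROOFS =====
def unzip3 (l : List (Int × Int × Int)) : List Int × List Int × List Int :=
  (l.map (·.1), l.map (·.2.1), l.map (·.2.2))

lemma zip3L_drop_step (r c v : List Int) (i : Nat)
    (hi : i < r.length) (hc : r.length ≤ c.length) (hv : r.length ≤ v.length) :
    zip3L (r.drop i) (c.drop i) (v.drop i)
      = (r.getD i 0, c.getD i 0, v.getD i 0) :: zip3L (r.drop (i+1)) (c.drop (i+1)) (v.drop (i+1)) := by
  have hic : i < c.length := lt_of_lt_of_le hi hc
  have hiv : i < v.length := lt_of_lt_of_le hi hv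
  rw [List.drop_eq_getElem_cons hi, List.drop_eq_getElem_cons hic, List.drop_eq_getElem_cons hiv]
  simp [zip3L, hi, hic, hiv]

lemma zip3L_nil_left (c v : List Int) : zip3L [] c v = [] := by cases c <;> cases v <;> rfl

lemma mergeB_nil_right (a : List (Int × Int × Int)) : mergeB a [] = a := by
  cases a <;> simp [mergeB]

lemma csrTail_eq (r c v : List Int) (hc : r.length ≤ c.length) (hv : r.length ≤ v.length) :
    ∀ i, csrTail r c v i = unzip3 (zip3L (r.drop i) (c.drop i) (v.drop i)) := by
  intro i
  induction hn : r.length - i using Nat.strong_induction_on generalizing i with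
  | _ n ih =>
    rw [csrTail]
    by_cases hi : i < r.length
    · rw [zip3L_drop_step r c v i hi hc hv]
      have := ih (r.length - (i+1)) (by omega) (i+1) rfl
      simp only [hi, if_pos, this, unzip3, List.map_cons]
    · have : r.drop i = [] := List.drop_eq_nil_of_le (by omega)
      simp [hi, this, zip3L_nil_left, unzip3]

lemma csrMain_eq (r1 c1 v1 r2 c2 v2 : List Int)
    (h1c : r1.length ≤ c1.length) (h1v : r1.length ≤ v1.length)
    (h2c : r2.length ≤ c2.length) (h2v : r2.length ≤ v2.length) :
    ∀ i j, csrMain r1 c1 v1 r2 c2 v2 i j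
      = unzip3 (mergeB (zip3L (r1.drop i) (c1.drop i) (v1.drop i))
                       (zip3L (r2.drop j) (c2.drop j) (v2.drop j))) := by
  intro i j
  induction hn : (r1.length - i) + (r2.length - j) using Nat.strong_induction_on generalizing i j with
  | _ n ih =>
    rw [csrMain]
    by_cases hij : i < r1.length ∧ j < r2.length
    · obtain ⟨hi, hj⟩ := hij
      rw [zip3L_drop_step r1 c1 v1 i hi h1c h1v, zip3L_drop_step r2 c2 v2 j hj h2c h2v]
      simp only [hi, hj, and_self, if_pos, mergeB]
      split_ifs with h1 h2
      · rw [ih ((r1.length - (i+1)) + (r2.length - (j+1))) (by omega) (i+1) (j+1) rfl]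
        simp [unzip3]
      · rw [ih ((r1.length - (i+1)) + (r2.length - j)) (by omega) (i+1) j rfl]
        rw [zip3L_drop_step r2 c2 v2 j hj h2c h2v]
        simp [unzip3]
      · rw [ih ((r1.length - i) + (r2.length - (j+1))) (by omega) i (j+1) rfl]
        rw [zip3L_drop_step r1 c1 v1 i hi h1c h1v]
        simp [unzip3]
    · simp only [hij, if_neg, not_false_iff]
      rw [csrTail_eq r1 c1 v1 h1c h1v i, csrTail_eq r2 c2 v2 h2c h2v j]
      rcases not_and_or.mp hij with hi | hj
      · have hd : r1.drop i = [] := List.drop_eq_nil_of_le (by omega)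
        simp [hd, zip3L_nil_left, mergeB, unzip3]
      · have hd : r2.drop j = [] := List.drop_eq_nil_of_le (by omega)
        simp [hd, zip3L_nil_left, mergeB_nil_right, unzip3]

-- ===== VERDICT (by name: the statement is the Claim_ definition above) =====
theorem csr_addition_spec : Claim_equal_csr_addition := by
  intro r1 c1 v1 r2 c2 v2 _ hpre
  obtain ⟨h1c, h1v, h2c, h2v⟩ := hpre
  unfold Spec_csr_addition csr_addition csr_addition_alt
  rw [csrMain_eq r1 c1 v1 r2 c2 v2 h1c h1v h2c h2v 0 0]
  simp [unzip3]
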